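-- pv_equiv track=rewrite | github.com/jonathonreilly/toy-physics | scripts/frontier_s3_cap_uniqueness.py | classify_vertices
-- ===== SOURCE A (Python) =====
-- def classify_vertices(sites: set) -> tuple[set, set]:
--     """
--     Classify vertices as cubically interior or boundary.
--     A vertex v is cubically interior if ALL 8 unit cubes sharing v are present
--     (i.e., all 26 neighbors in the 3x3x3 block around v exist).
--     """
--     interior = set()
--     boundary = set()
--     for v in sites:
--         x, y, z = v
--         is_interior = True
--         for dx in (-1, 0, 1):
--             for dy in (-1, 0, 1):
--                 for dz in (-1, 0, 1):
--                     if dx == 0 and dy == 0 and dz == 0: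
--                         continue
--                     if (x + dx, y + dy, z + dz) not in sites:
--                         is_interior = False
--                         break
--                 if not is_interior:
--                     break
--             if not is_interior:
--                 break
--         if is_interior:
--             interior.add(v)
--         else:
--             boundary.add(v)
--     return interior, boundary
-- ===== SOURCE B (Python) =====
-- def classify_vertices(sites: set) -> tuple[set, set]:
--     """
--     Classify vertices as cubically interior or boundary, by vote counting:
--     every site casts one vote into each of its 26 neighbor positions; a
--     vertex is interior iff it received exactly 26 votes.
--     """
--     offsets = [(dx, dy, dz)
--                for dx in (-1, 0, 1)
--                for dy in (-1, 0, 1)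
--                for dz in (-1, 0, 1)
--                if (dx, dy, dz) != (0, 0, 0)]
--     count = {}
--     for (x, y, z) in sites:
--         for (dx, dy, dz) in offsets:
--             key = (x - dx, y - dy, z - dz)
--             count[key] = count.get(key, 0) + 1
--     interior = set()
--     boundary = set()
--     for v in sites:
--         if count.get(v, 0) == 26:
--             interior.add(v)
--         else:
--             boundary.add(v)
--     return interior, boundary
-- ===== Notes on version B (the rewrite author's own statement) =====
-- stated objective: alternative
-- what changed: A probes, for each vertex, all 26 neighbor positions with membership tests and early breaks; B makes one scatter pass in which every site votes into a dict at each of its 26 neighbor positions, then classifies each vertex by the threshold count == 26, with no membership test at all.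
import Mathlib
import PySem

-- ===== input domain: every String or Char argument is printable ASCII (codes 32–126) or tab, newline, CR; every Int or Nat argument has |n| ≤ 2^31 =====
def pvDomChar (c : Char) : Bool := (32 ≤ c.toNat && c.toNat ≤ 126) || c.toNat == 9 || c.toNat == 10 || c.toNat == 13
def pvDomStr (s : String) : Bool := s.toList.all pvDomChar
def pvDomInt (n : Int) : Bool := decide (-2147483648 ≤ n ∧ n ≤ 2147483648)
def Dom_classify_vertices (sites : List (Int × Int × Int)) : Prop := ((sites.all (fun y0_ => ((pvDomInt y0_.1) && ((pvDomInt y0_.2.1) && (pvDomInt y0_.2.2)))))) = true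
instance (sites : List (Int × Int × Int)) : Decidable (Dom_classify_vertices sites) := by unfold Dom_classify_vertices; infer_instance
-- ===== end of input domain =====

-- B replaces A's per-vertex 26-neighbor membership scan (with early break) by one
-- scatter pass that lets every site vote into its 26 neighbor cells, then a single
-- threshold pass (count == 26); objective: alternative algorithm, no membership probes.

-- ===== PORT A =====
-- the innermost 'for dz' loop; returning false = Python's 'is_interior = False; break'
def pvLoopZ (sites : List (Int × Int × Int)) (x y z dx dy : Int) : List Int → Bool
  | [] => true
  | dz :: rest =>
    if dx = 0 ∧ dy = 0 ∧ dz = 0 then pvLoopZ sites x y z dx dy rest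
    else if ¬ ((x + dx, y + dy, z + dz) ∈ sites) then false
    else pvLoopZ sites x y z dx dy rest

-- the 'for dy' loop; a false inner result propagates the break
def pvLoopY (sites : List (Int × Int × Int)) (x y z dx : Int) : List Int → Bool
  | [] => true
  | dy :: rest =>
    if pvLoopZ sites x y z dx dy [-1, 0, 1] then pvLoopY sites x y z dx rest else false

-- the 'for dx' loop
def pvLoopX (sites : List (Int × Int × Int)) (x y z : Int) : List Int → Bool
  | [] => true
  | dx :: rest =>
    if pvLoopY sites x y z dx [-1, 0, 1] then pvLoopX sites x y z rest else false

def classify_vertices (sites : List (Int × Int × Int)) : (List (Int × Int × Int)) × (List (Int × Int × Int)) :=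
  sites.foldl
    (fun pr v =>
      let x := v.1; let y := v.2.1; let z := v.2.2
      if pvLoopX sites x y z [-1, 0, 1] then (PySem.Set.add pr.1 v, pr.2)
      else (pr.1, PySem.Set.add pr.2 v))
    (PySem.Set.empty, PySem.Set.empty)

-- ===== PORT B =====
-- the offsets comprehension of Source B
def pvOffsets : List (Int × Int × Int) :=
  ([-1, 0, 1] : List Int).flatMap (fun dx =>
    ([-1, 0, 1] : List Int).flatMap (fun dy =>
      (([-1, 0, 1] : List Int).filter (fun dz => decide (¬ (dx = 0 ∧ dy = 0 ∧ dz = 0)))).map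
        (fun dz => (dx, dy, dz))))

def classify_vertices_alt (sites : List (Int × Int × Int)) : (List (Int × Int × Int)) × (List (Int × Int × Int)) :=
  let count : PySem.Dict (Int × Int × Int) Int :=
    sites.foldl
      (fun d s =>
        pvOffsets.foldl
          (fun d o =>
            let key := (s.1 - o.1, s.2.1 - o.2.1, s.2.2 - o.2.2)
            d.insert key (d.getD key 0 + 1))
          d)
      PySem.Dict.empty
  sites.foldl
    (fun pr v =>
      if count.getD v 0 = 26 then (PySem.Set.add pr.1 v, pr.2)
      else (pr.1, PySem.Set.add pr.2 v))
    (PySem.Set.empty, PySem.Set.empty)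

-- ===== PRECONDITION & SPEC =====
-- Pre_ requires the sites to be pairwise distinct: the Python parameter is a set, so the
-- List models its distinct elements; on a list WITH duplicates B's vote counts are inflated
-- and the two programs can disagree, but such a list is not a set.
def Pre_classify_vertices (sites : List (Int × Int × Int)) : Prop := sites.Nodup
instance (sites : List (Int × Int × Int)) : Decidable (Pre_classify_vertices sites) := by unfold Pre_classify_vertices; infer_instance

def pvWitness_classify_vertices : (List (Int × Int × Int)) := [(0, 0, 0), (1, 0, 0)]

def Spec_classify_vertices (sites : List (Int × Int × Int)) (out : (List (Int × Int × Int)) × (List (Int × Int × Int))) : Prop := out = classify_vertices_alt sites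
instance (sites : List (Int × Int × Int)) (out : (List (Int × Int × Int)) × (List (Int × Int × Int))) : Decidable (Spec_classify_vertices sites out) := by unfold Spec_classify_vertices; infer_instance

-- ===== CLAIM (what is proved, stated in full; the proofs are below) =====
def Claim_equal_classify_vertices : Prop := ∀ (sites : List (Int × Int × Int)), Dom_classify_vertices sites → Pre_classify_vertices sites → Spec_classify_vertices sites (classify_vertices sites)

-- ===== LEMMAS AND PROOFS =====

-- the list of all votes cast by B's scatter pass
def pvVotes (sites : List (Int × Int × Int)) : List (Int × Int × Int) :=
  sites.flatMap (fun s => pvOffsets.map (fun o => (s.1 - o.1, s.2.1 - o.2.1, s.2.2 - o.2.2)))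

lemma pvCounts_eq (sites : List (Int × Int × Int)) :
    sites.foldl
      (fun d s =>
        pvOffsets.foldl
          (fun d o =>
            let key := (s.1 - o.1, s.2.1 - o.2.1, s.2.2 - o.2.2)
            d.insert key (d.getD key 0 + 1))
          d)
      (PySem.Dict.empty : PySem.Dict (Int × Int × Int) Int)
    = (pvVotes sites).foldl (fun d k => d.insert k (d.getD k 0 + 1)) PySem.Dict.empty := by
  simp [pvVotes, List.foldl_flatMap, List.foldl_map]

lemma pvOffsets_nodup : pvOffsets.Nodup := by decide

lemma pvCount_votes (sites : List (Int × Int × Int)) (v : Int × Int × Int) :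
    (pvVotes sites).count v
      = sites.countP (fun s => decide ((s.1 - v.1, s.2.1 - v.2.1, s.2.2 - v.2.2) ∈ pvOffsets)) := by
  induction sites with
  | nil => simp [pvVotes]
  | cons s rest ih =>
    have hmap : (pvOffsets.map (fun o => (s.1 - o.1, s.2.1 - o.2.1, s.2.2 - o.2.2))).count v
        = pvOffsets.count (s.1 - v.1, s.2.1 - v.2.1, s.2.2 - v.2.2) := by
      simp only [List.count, List.countP_map]
      apply List.countP_congr
      intro o _
      obtain ⟨o1, o2, o3⟩ := o
      obtain ⟨v1, v2, v3⟩ := v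
      obtain ⟨s1, s2, s3⟩ := s
      simp only [Function.comp, beq_iff_eq, Prod.mk.injEq]
      constructor <;> (intro h; refine ⟨?_, ?_, ?_⟩ <;> omega)
    have hcnt : pvOffsets.count (s.1 - v.1, s.2.1 - v.2.1, s.2.2 - v.2.2)
        = if (s.1 - v.1, s.2.1 - v.2.1, s.2.2 - v.2.2) ∈ pvOffsets then 1 else 0 := by
      split
      · exact List.count_eq_one_of_mem pvOffsets_nodup (by assumption)
      · exact List.count_eq_zero_of_not_mem (by assumption)
    simp only [pvVotes, List.flatMap_cons, List.count_append, List.countP_cons]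
    rw [show (List.flatMap (fun s => pvOffsets.map (fun o => (s.1 - o.1, s.2.1 - o.2.1, s.2.2 - o.2.2))) rest) = pvVotes rest from rfl]
    rw [hmap, hcnt, ih]
    split <;> simp_all [Nat.add_comm]

-- sub (· - v) is injective
lemma pvSub_inj (v : Int × Int × Int) :
    Function.Injective (fun s : Int × Int × Int => (s.1 - v.1, s.2.1 - v.2.1, s.2.2 - v.2.2)) := by
  intro a b h
  obtain ⟨a1, a2, a3⟩ := a; obtain ⟨b1, b2, b3⟩ := b
  simp at h; simp; omega

-- the counting bijection: on a duplicate-free site list, the number of sites that see v as a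
-- neighbor equals the number of offsets o with v + o present
lemma pvCountP_swap (sites : List (Int × Int × Int)) (v : Int × Int × Int)
    (hnd : sites.Nodup) :
    sites.countP (fun s => decide ((s.1 - v.1, s.2.1 - v.2.1, s.2.2 - v.2.2) ∈ pvOffsets))
      = pvOffsets.countP (fun o => decide ((v.1 + o.1, v.2.1 + o.2.1, v.2.2 + o.2.2) ∈ sites)) := by
  rw [List.countP_eq_length_filter, List.countP_eq_length_filter]
  have hperm : ((sites.filter (fun s => decide ((s.1 - v.1, s.2.1 - v.2.1, s.2.2 - v.2.2) ∈ pvOffsets))).map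
      (fun s => (s.1 - v.1, s.2.1 - v.2.1, s.2.2 - v.2.2))).Perm
      (pvOffsets.filter (fun o => decide ((v.1 + o.1, v.2.1 + o.2.1, v.2.2 + o.2.2) ∈ sites))) := by
    rw [List.perm_ext_iff_of_nodup
      ((hnd.filter _).map (pvSub_inj v)) (pvOffsets_nodup.filter _)]
    intro w
    simp only [List.mem_map, List.mem_filter, decide_eq_true_eq]
    constructor
    · rintro ⟨s, ⟨hs, hoff⟩, rfl⟩
      refine ⟨hoff, ?_⟩
      have : (v.1 + (s.1 - v.1), v.2.1 + (s.2.1 - v.2.1), v.2.2 + (s.2.2 - v.2.2)) = s := by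
        obtain ⟨s1, s2, s3⟩ := s; simp only [Prod.mk.injEq]; omega
      rw [this]; exact hs
    · rintro ⟨hoff, hs⟩
      refine ⟨(v.1 + w.1, v.2.1 + w.2.1, v.2.2 + w.2.2), ⟨hs, ?_⟩, ?_⟩
      · simpa using hoff
      · obtain ⟨w1, w2, w3⟩ := w; simp
  calc (sites.filter _).length
      = ((sites.filter (fun s => decide ((s.1 - v.1, s.2.1 - v.2.1, s.2.2 - v.2.2) ∈ pvOffsets))).map
          (fun s => (s.1 - v.1, s.2.1 - v.2.1, s.2.2 - v.2.2))).length := by simp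
    _ = _ := hperm.length_eq

-- A's triple loop, characterised as a ∀ over the three literal ranges
lemma pvLoopZ_eq (sites : List (Int × Int × Int)) (x y z dx dy : Int) (l : List Int) :
    pvLoopZ sites x y z dx dy l = true
      ↔ ∀ dz ∈ l, ¬ (dx = 0 ∧ dy = 0 ∧ dz = 0) → (x + dx, y + dy, z + dz) ∈ sites := by
  induction l with
  | nil => simp [pvLoopZ]
  | cons dz rest ih =>
    simp only [pvLoopZ, List.mem_cons]
    split
    · rw [ih]
      constructor
      · intro h dz' hdz' hne
        rcases hdz' with rfl | hdz'
        · exact absurd ‹_› hne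
        · exact h dz' hdz' hne
      · intro h dz' hdz' hne
        exact h dz' (Or.inr hdz') hne
    · split
      · constructor
        · intro h; cases h
        · intro h; exact absurd (h dz (Or.inl rfl) ‹_›) ‹_›
      · rw [ih]
        constructor
        · intro h dz' hdz' hne
          rcases hdz' with rfl | hdz'
          · simp_all
          · exact h dz' hdz' hne
        · intro h dz' hdz' hne
          exact h dz' (Or.inr hdz') hne

lemma pvLoopY_eq (sites : List (Int × Int × Int)) (x y z dx : Int) (l : List Int) :
    pvLoopY sites x y z dx l = true
      ↔ ∀ dy ∈ l, pvLoopZ sites x y z dx dy [-1, 0, 1] = true := by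
  induction l with
  | nil => simp [pvLoopY]
  | cons dy rest ih =>
    simp only [pvLoopY, List.mem_cons]
    split <;> rename_i hz
    · rw [ih]
      constructor
      · intro h dy' hdy'
        rcases hdy' with rfl | hdy'
        · exact hz
        · exact h dy' hdy'
      · intro h dy' hdy'
        exact h dy' (Or.inr hdy')
    · constructor
      · intro h; cases h
      · intro h; exact absurd (h dy (Or.inl rfl)) hz

lemma pvLoopX_eq (sites : List (Int × Int × Int)) (x y z : Int) (l : List Int) :
    pvLoopX sites x y z l = true
      ↔ ∀ dx ∈ l, pvLoopY sites x y z dx [-1, 0, 1] = true := by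
  induction l with
  | nil => simp [pvLoopX]
  | cons dx rest ih =>
    simp only [pvLoopX, List.mem_cons]
    split <;> rename_i hy
    · rw [ih]
      constructor
      · intro h dx' hdx'
        rcases hdx' with rfl | hdx'
        · exact hy
        · exact h dx' hdx'
      · intro h dx' hdx'
        exact h dx' (Or.inr hdx')
    · constructor
      · intro h; cases h
      · intro h; exact absurd (h dx (Or.inl rfl)) hy

-- B's threshold test agrees with A's scan, for every vertex, on duplicate-free sites
lemma pvCond_iff (sites : List (Int × Int × Int)) (hnd : sites.Nodup) (v : Int × Int × Int) :
    ((sites.foldl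
        (fun d s =>
          pvOffsets.foldl
            (fun d o =>
              let key := (s.1 - o.1, s.2.1 - o.2.1, s.2.2 - o.2.2)
              d.insert key (d.getD key 0 + 1))
            d)
        (PySem.Dict.empty : PySem.Dict (Int × Int × Int) Int)).getD v 0 = 26)
      ↔ pvLoopX sites v.1 v.2.1 v.2.2 [-1, 0, 1] = true := by
  rw [pvCounts_eq]
  simp only [PySem.Dict.getD_foldl_insert_add_one]
  have hgd : (PySem.Dict.empty : PySem.Dict (Int × Int × Int) Int).getD v 0 = 0 := rfl
  rw [hgd, zero_add, pvCount_votes, pvCountP_swap sites v hnd]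
  have hlen :
      (pvOffsets.countP (fun o => decide ((v.1 + o.1, v.2.1 + o.2.1, v.2.2 + o.2.2) ∈ sites)) = 26)
        ↔ ∀ o ∈ pvOffsets, (v.1 + o.1, v.2.1 + o.2.1, v.2.2 + o.2.2) ∈ sites := by
    rw [List.countP_eq_length_filter]
    have h26 : pvOffsets.length = 26 := by decide
    constructor
    · intro h
      have := List.length_filter_eq_length_iff (l := pvOffsets)
        (p := fun o => decide ((v.1 + o.1, v.2.1 + o.2.1, v.2.2 + o.2.2) ∈ sites))
      rw [h26] at this
      simpa using this.1 h
    · intro h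
      rw [List.length_filter_eq_length_iff.2 (by simpa using h), h26]
  constructor
  · intro h
    rw [pvLoopX_eq]
    intro dx hdx
    rw [pvLoopY_eq]
    intro dy hdy
    rw [pvLoopZ_eq]
    intro dz hdz hne
    have hc : pvOffsets.countP (fun o => decide ((v.1 + o.1, v.2.1 + o.2.1, v.2.2 + o.2.2) ∈ sites)) = 26 := by exact_mod_cast h
    have hall := hlen.1 hc (dx, dy, dz) (by
      simp only [pvOffsets, List.mem_flatMap, List.mem_map, List.mem_filter, decide_eq_true_eq]
      exact ⟨dx, hdx, dy, hdy, dz, ⟨hdz, hne⟩, rfl⟩)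
    simpa using hall
  · intro h
    have hall : ∀ o ∈ pvOffsets, (v.1 + o.1, v.2.1 + o.2.1, v.2.2 + o.2.2) ∈ sites := by
      intro o ho
      simp only [pvOffsets, List.mem_flatMap, List.mem_map, List.mem_filter,
        decide_eq_true_eq] at ho
      obtain ⟨dx, hdx, dy, hdy, dz, ⟨hdz, hne⟩, rfl⟩ := ho
      have h1 := (pvLoopY_eq ..).1 ((pvLoopX_eq ..).1 h dx hdx) dy hdy
      exact (pvLoopZ_eq ..).1 h1 dz hdz hne
    exact_mod_cast hlen.2 hall

-- ===== VERDICT (by name: the statement is the Claim_ definition above) =====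
theorem classify_vertices_spec : Claim_equal_classify_vertices := by
  intro sites _ hpre
  unfold Spec_classify_vertices classify_vertices classify_vertices_alt
  apply PySem.List.foldl_congr_mem
  intro acc v _
  have hiff := pvCond_iff sites hpre v
  show (if pvLoopX sites v.1 v.2.1 v.2.2 [-1, 0, 1] = true then (PySem.Set.add acc.1 v, acc.2)
        else (acc.1, PySem.Set.add acc.2 v)) = _
  split <;> split <;> rename_i h1 h2
  · rfl
  · exact absurd (hiff.2 h1) h2
  · exact absurd (hiff.1 h2) h1
  · rfl
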